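-- pv_equiv track=rewrite | github.com/hdbhoang2703/vietnamese_medical_chatbot | source/core/utils.py | chunking_corpus
-- ===== SOURCE A (Python) =====
-- from typing import List
--
-- def chunking_corpus(corpus: List[List[str]], chunk_size: int) -> List[str]:
--     chunk_corpus = []
--     idx = 0
--     length = len(corpus)
--
--     while idx < length:
--         current_doc = corpus[idx]
--         total_words = sum(len(sentence.split()) for sentence in current_doc)
--
--         if total_words < chunk_size:
--             combined_sentences = current_doc.copy()
--             idx += 1
--             while idx < length and \
--                 (sum(len(sentence.split()) for sentence in combined_sentences) +
--                  sum(len(sentence.split()) for sentence in corpus[idx])) <= chunk_size: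
--                 combined_sentences.extend(corpus[idx])
--                 idx += 1
--             chunk_corpus.append(".".join(combined_sentences))
--         else:
--             flat_sentences = current_doc
--             sub_chunk = []
--             word_count = 0
--             for sentence in flat_sentences:
--                 sentence_word_count = len(sentence.split())
--                 if word_count + sentence_word_count <= chunk_size:
--                     sub_chunk.append(sentence)
--                     word_count += sentence_word_count
--                 else:
--                     chunk_corpus.append(".".join(sub_chunk))
--                     sub_chunk = [sentence]
--                     word_count = sentence_word_count
--             if sub_chunk:
--                 chunk_corpus.append(".".join(sub_chunk))
--             idx += 1
--
--     return chunk_corpus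
-- ===== SOURCE B (Python) =====
-- from typing import List
--
-- def chunking_corpus(corpus: List[List[str]], chunk_size: int) -> List[str]:
--     # One pass: split each sentence once, keep running word totals (no re-summing).
--     counts = [[len(s.split()) for s in doc] for doc in corpus]
--     chunks = []
--     buf = None  # sentence buffer of the chunk being merged; None = not merging
--     buf_words = 0
--     for doc, doc_counts in zip(corpus, counts):
--         doc_words = sum(doc_counts)
--         if buf is not None:
--             if buf_words + doc_words <= chunk_size:
--                 buf.extend(doc)
--                 buf_words += doc_words
--                 continue
--             chunks.append(".".join(buf))
--             buf = None
--         if doc_words < chunk_size: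
--             buf = list(doc)
--             buf_words = doc_words
--         else:
--             sub = []
--             sub_words = 0
--             for sentence, n in zip(doc, doc_counts):
--                 if sub_words + n <= chunk_size:
--                     sub.append(sentence)
--                     sub_words += n
--                 else:
--                     chunks.append(".".join(sub))
--                     sub = [sentence]
--                     sub_words = n
--             if sub:
--                 chunks.append(".".join(sub))
--     if buf is not None:
--         chunks.append(".".join(buf))
--     return chunks
-- ===== Notes on version B (the rewrite author's own statement) =====
-- stated objective: faster
-- what changed: B splits every sentence exactly once and fuses A's nested while-loops into a single pass over the documents with a running word-count buffer, instead of re-splitting and re-summing the growing combined chunk on every merge step.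
import Mathlib
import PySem

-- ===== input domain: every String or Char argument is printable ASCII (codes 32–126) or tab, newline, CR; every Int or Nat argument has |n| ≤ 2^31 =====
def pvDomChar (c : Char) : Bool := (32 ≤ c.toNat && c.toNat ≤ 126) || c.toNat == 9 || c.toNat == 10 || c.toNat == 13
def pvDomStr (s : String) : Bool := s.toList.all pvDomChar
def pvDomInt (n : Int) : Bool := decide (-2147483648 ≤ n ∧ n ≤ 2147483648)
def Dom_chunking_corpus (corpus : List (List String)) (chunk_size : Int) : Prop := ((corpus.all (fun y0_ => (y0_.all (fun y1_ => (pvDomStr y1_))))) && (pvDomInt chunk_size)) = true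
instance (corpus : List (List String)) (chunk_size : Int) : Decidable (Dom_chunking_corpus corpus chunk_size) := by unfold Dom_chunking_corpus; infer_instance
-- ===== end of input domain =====

-- B replaces A's repeated re-summing of word counts (generator re-sums per merge step) by
-- per-sentence counts computed once and running totals in a single pass over the documents.


-- ===== PORT A =====
-- len(sentence.split())
def pvWC (s : String) : Int := ((PySem.Str.split₀ s).length : Int)

-- sum(len(sentence.split()) for sentence in doc)
def pvTotalW (doc : List String) : Int := (doc.map pvWC).sum

-- inner 'while idx < length and (sum(combined) + sum(corpus[idx])) <= chunk_size' loop: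
-- returns (combined_sentences, remaining docs).  Re-sums combined each iteration, as A does.
def pvMergeLoop (rest : List (List String)) (combined : List String) (chunk_size : Int) :
    List String × List (List String) :=
  match rest with
  | [] => (combined, [])
  | d :: tl =>
    if pvTotalW combined + pvTotalW d ≤ chunk_size then
      pvMergeLoop tl (combined ++ d) chunk_size
    else (combined, d :: tl)

theorem pvMergeLoop_len (rest : List (List String)) (combined : List String) (cs : Int) :
    (pvMergeLoop rest combined cs).2.length ≤ rest.length := by
  induction rest generalizing combined with
  | nil => simp [pvMergeLoop]
  | cons d tl ih =>
    simp only [pvMergeLoop]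
    split
    · exact le_trans (ih _) (by simp)
    · simp

-- 'for sentence in flat_sentences: …' body of the else-branch; state (sub_chunk, word_count)
def pvSplitLoop (sentences : List String) (sub : List String) (wc : Int) (chunk_size : Int) :
    List String :=
  match sentences with
  | [] => if sub ≠ [] then [PySem.Str.join "." sub] else []
  | s :: tl =>
    let swc := pvWC s
    if wc + swc ≤ chunk_size then pvSplitLoop tl (sub ++ [s]) (wc + swc) chunk_size
    else PySem.Str.join "." sub :: pvSplitLoop tl [s] swc chunk_size

-- outer 'while idx < length' loop, recursing on the docs from idx on
def pvLoopA (docs : List (List String)) (chunk_size : Int) : List String :=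
  match docs with
  | [] => []
  | d :: tl =>
    if pvTotalW d < chunk_size then
      let m := pvMergeLoop tl d chunk_size
      PySem.Str.join "." m.1 :: pvLoopA m.2 chunk_size
    else
      pvSplitLoop d [] 0 chunk_size ++ pvLoopA tl chunk_size
termination_by docs.length
decreasing_by
  · exact Nat.lt_succ_of_le (pvMergeLoop_len tl d chunk_size)
  · simp

def chunking_corpus (corpus : List (List String)) (chunk_size : Int) : List String :=
  pvLoopA corpus chunk_size

-- ===== PORT B =====
-- the inner 'for sentence, n in zip(doc, doc_counts)' loop of Source B's split branch
def pvSplitB (pairs : List (String × Int)) (sub : List String) (subw : Int) (chunk_size : Int) :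
    List String :=
  match pairs with
  | [] => if sub ≠ [] then [PySem.Str.join "." sub] else []
  | (s, n) :: tl =>
    if subw + n ≤ chunk_size then pvSplitB tl (sub ++ [s]) (subw + n) chunk_size
    else PySem.Str.join "." sub :: pvSplitB tl [s] n chunk_size

-- the main 'for doc, doc_counts in zip(corpus, counts)' loop of Source B;
-- state: buf (None = not merging) and buf_words
def pvLoopB (pairs : List (List String × List Int)) (buf : Option (List String))
    (bufw : Int) (chunk_size : Int) : List String :=
  match pairs with
  | [] => match buf with
          | some b => [PySem.Str.join "." b]
          | none => []
  | (d, cnts) :: tl =>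
    let dw := cnts.sum
    match buf with
    | some b =>
      if bufw + dw ≤ chunk_size then pvLoopB tl (some (b ++ d)) (bufw + dw) chunk_size
      else
        PySem.Str.join "." b ::
          (if dw < chunk_size then pvLoopB tl (some d) dw chunk_size
           else pvSplitB (d.zip cnts) [] 0 chunk_size ++ pvLoopB tl none 0 chunk_size)
    | none =>
      if dw < chunk_size then pvLoopB tl (some d) dw chunk_size
      else pvSplitB (d.zip cnts) [] 0 chunk_size ++ pvLoopB tl none 0 chunk_size

def chunking_corpus_alt (corpus : List (List String)) (chunk_size : Int) : List String :=
  let counts := corpus.map (fun doc => doc.map (fun s => ((PySem.Str.split₀ s).length : Int)))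
  pvLoopB (corpus.zip counts) none 0 chunk_size

-- ===== PRECONDITION & SPEC =====
def Spec_chunking_corpus (corpus : List (List String)) (chunk_size : Int) (out : List String) : Prop := out = chunking_corpus_alt corpus chunk_size
instance (corpus : List (List String)) (chunk_size : Int) (out : List String) : Decidable (Spec_chunking_corpus corpus chunk_size out) := by unfold Spec_chunking_corpus; infer_instance

-- ===== CLAIM (what is proved, stated in full; the proofs are below) =====
def Claim_equal_chunking_corpus : Prop := ∀ (corpus : List (List String)) (chunk_size : Int), Dom_chunking_corpus corpus chunk_size → Spec_chunking_corpus corpus chunk_size (chunking_corpus corpus chunk_size)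

-- ===== LEMMAS AND PROOFS =====

-- notation shorthand for the per-sentence count function Source B precomputes
def pvF : String → Int := fun s => ((PySem.Str.split₀ s).length : Int)

def pvZC (docs : List (List String)) : List (List String × List Int) :=
  docs.zip (docs.map (fun doc => doc.map pvF))

theorem pvZC_nil : pvZC [] = [] := rfl

theorem pvZC_cons (d : List String) (tl : List (List String)) :
    pvZC (d :: tl) = (d, d.map pvF) :: pvZC tl := by
  simp [pvZC]

theorem pvTotalW_eq (d : List String) : pvTotalW d = (d.map pvF).sum := rfl

theorem pvTotalW_append (a b : List String) :
    pvTotalW (a ++ b) = pvTotalW a + pvTotalW b := by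
  simp [pvTotalW]

-- the split branches agree: B's zip-with-counts loop equals A's re-splitting loop
theorem pvSplit_eq (sentences : List String) (sub : List String) (wc cs : Int) :
    pvSplitB (sentences.zip (sentences.map pvF)) sub wc cs = pvSplitLoop sentences sub wc cs := by
  induction sentences generalizing sub wc with
  | nil => rfl
  | cons s tl ih =>
    simp only [List.map_cons, List.zip_cons_cons, pvSplitB, pvSplitLoop]
    have hf : pvF s = pvWC s := rfl
    rw [hf]
    split
    · exact ih _ _
    · rw [ih]

-- the merge phase: B's buffered state equals A's inner while loop followed by a fresh restart
theorem pvMerge_eq (rest : List (List String)) (b : List String) (cs : Int) :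
    pvLoopB (pvZC rest) (some b) (pvTotalW b) cs =
      PySem.Str.join "." (pvMergeLoop rest b cs).1 ::
        pvLoopB (pvZC (pvMergeLoop rest b cs).2) none 0 cs := by
  induction rest generalizing b with
  | nil => rfl
  | cons d tl ih =>
    rw [pvZC_cons]
    simp only [pvLoopB, pvMergeLoop]
    have hd : (d.map pvF).sum = pvTotalW d := (pvTotalW_eq d).symm
    rw [hd]
    split
    · rw [← pvTotalW_append, ih (b ++ d)]
    · rw [pvZC_cons]
      simp only [pvLoopB, hd]

-- the whole programs agree (strong induction on the number of remaining documents)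
theorem pvMain : ∀ (n : Nat) (docs : List (List String)) (cs : Int), docs.length ≤ n →
    pvLoopA docs cs = pvLoopB (pvZC docs) none 0 cs := by
  intro n
  induction n with
  | zero =>
    intro docs cs h
    rw [List.length_eq_zero_iff.mp (Nat.le_zero.mp h), pvZC_nil]
    simp [pvLoopA, pvLoopB]
  | succ n ih =>
    intro docs cs h
    match docs with
    | [] => rw [pvZC_nil]; simp [pvLoopA, pvLoopB]
    | d :: tl =>
      rw [pvZC_cons]
      simp only [pvLoopA, pvLoopB]
      have hd : (d.map pvF).sum = pvTotalW d := (pvTotalW_eq d).symm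
      rw [hd]
      split
      · have hb := pvMerge_eq tl d cs
        rw [hb]
        congr 1
        exact ih _ _ (le_trans (pvMergeLoop_len tl d cs)
          (Nat.le_of_succ_le_succ (by simpa using h)))
      · rw [pvSplit_eq, ih tl cs (Nat.le_of_succ_le_succ (by simpa using h))]

-- ===== VERDICT (by name: the statement is the Claim_ definition above) =====
theorem chunking_corpus_spec : Claim_equal_chunking_corpus := by
  intro corpus cs _
  unfold Spec_chunking_corpus chunking_corpus chunking_corpus_alt
  exact pvMain corpus.length corpus cs le_rfl
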